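-- pv_equiv track=rewrite | github.com/VoGPro/pythonLabs | Lab1/task15-19.py | findBeforeMin
-- ===== SOURCE A (Python) =====
-- def findBeforeMin(arr):
--     beforeMin = []
--     minValue = min(arr)
--     i = 0
--     while arr[i] != minValue:
--         beforeMin.append(arr[i])
--         i += 1
--     return beforeMin
-- ===== SOURCE B (Python) =====
-- def findBeforeMin(arr):
--     minValue = min(arr)
--     idx = arr.index(minValue)
--     return list(arr[:idx])
-- ===== Notes on version B (the rewrite author's own statement) =====
-- stated objective: simpler
-- what changed: Replaces the explicit while/append scan with a locate-then-slice formulation: compute min once, find its first index, return the slice before it.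
-- outside the precondition, e.g. on findBeforeMin([]): A raises ValueError, B raises ValueError
import Mathlib
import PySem

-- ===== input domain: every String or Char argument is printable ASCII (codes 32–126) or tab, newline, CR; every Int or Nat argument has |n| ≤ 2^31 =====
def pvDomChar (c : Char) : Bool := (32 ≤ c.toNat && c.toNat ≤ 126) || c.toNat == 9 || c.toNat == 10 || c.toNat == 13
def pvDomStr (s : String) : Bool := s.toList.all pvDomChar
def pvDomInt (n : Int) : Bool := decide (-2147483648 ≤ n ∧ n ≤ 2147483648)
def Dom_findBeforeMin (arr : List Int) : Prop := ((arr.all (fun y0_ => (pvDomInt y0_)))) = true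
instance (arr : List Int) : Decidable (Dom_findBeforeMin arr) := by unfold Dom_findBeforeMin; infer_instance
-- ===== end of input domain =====

-- ===== PORT A =====
-- B change: locate-then-slice (min + index + slice) instead of A's explicit while/append scan; objective: simpler.
-- the while loop 'while arr[i] != minValue: append; i += 1' as structural recursion over arr with the same state
def findBeforeMinGo (minValue : Int) : List Int → List Int
  | [] => []
  | x :: rest => if x ≠ minValue then x :: findBeforeMinGo minValue rest else []

def findBeforeMin (arr : List Int) : List Int :=
  match PySem.List.min? arr (fun y => y) with
  | none => []   -- min([]) raises ValueError; excluded by Pre_findBeforeMin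
  | some m => findBeforeMinGo m arr

-- ===== PORT B =====
def findBeforeMin_alt (arr : List Int) : List Int :=
  match PySem.List.min? arr (fun y => y) with
  | none => []   -- min([]) raises ValueError; excluded by Pre_findBeforeMin
  | some m =>
    match PySem.List.index? arr m with
    | none => []   -- unreachable: arr.index(min(arr)) always succeeds
    | some i => PySem.List.slice arr none (some (i : Int))

-- ===== PRECONDITION & SPEC =====
-- Pre_ excludes only the empty list, on which A (and B) raise ValueError from min([]).
def Pre_findBeforeMin (arr : List Int) : Prop := arr ≠ []
instance (arr : List Int) : Decidable (Pre_findBeforeMin arr) := by unfold Pre_findBeforeMin; infer_instance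
def pvWitness_findBeforeMin : List Int := ([3, 1, 2] : List Int)

def Spec_findBeforeMin (arr : List Int) (out : List Int) : Prop := out = findBeforeMin_alt arr
instance (arr : List Int) (out : List Int) : Decidable (Spec_findBeforeMin arr out) := by unfold Spec_findBeforeMin; infer_instance

-- ===== CLAIM (what is proved, stated in full; the proofs are below) =====
def Claim_equal_findBeforeMin : Prop := ∀ (arr : List Int), Dom_findBeforeMin arr → Pre_findBeforeMin arr → Spec_findBeforeMin arr (findBeforeMin arr)

-- ===== LEMMAS AND PROOFS =====

theorem go_eq_take (m : Int) (xs : List Int) (h : m ∈ xs) :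
    ∃ i, PySem.List.index? xs m = some i ∧ findBeforeMinGo m xs = xs.take i := by
  induction xs with
  | nil => cases h
  | cons x t ih =>
    by_cases hx : x = m
    · subst hx
      exact ⟨0, PySem.List.index?_cons_self x t, by simp [findBeforeMinGo]⟩
    · have hmt : m ∈ t := by
        rcases List.mem_cons.mp h with h' | h'
        · exact absurd h'.symm hx
        · exact h'
      obtain ⟨i, hi, hgo⟩ := ih hmt
      refine ⟨i + 1, ?_, ?_⟩
      · have h := PySem.List.index?_cons_of_ne (xs := t) hx
        rw [h, hi]; rfl
      · simp [findBeforeMinGo, hx, hgo]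

-- ===== VERDICT (by name: the statement is the Claim_ definition above) =====
theorem findBeforeMin_spec : Claim_equal_findBeforeMin := by
  intro arr _ hpre
  unfold Spec_findBeforeMin findBeforeMin findBeforeMin_alt
  cases hm : PySem.List.min? arr (fun y => y) with
  | none => exact absurd ((PySem.List.min?_eq_none_iff arr (fun y => y)).mp hm) hpre
  | some m =>
    have hmem : m ∈ arr := PySem.List.min?_mem hm
    obtain ⟨i, hi, hgo⟩ := go_eq_take m arr hmem
    rw [PySem.List.index?_eq_idxOf?] at hi
    simp [hi, hgo, PySem.List.slice_to_natCast]
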